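-- pv_equiv track=rewrite | github.com/hutchybop/reelclean | reelclean/core/quality_service.py | classify_resolution
-- ===== SOURCE A (Python) =====
-- RESOLUTION_TIERS = {
--     "SD": 0,
--     "720p": 1280,
--     "1080p": 1920,
--     "4K": 3840,
-- }
--
-- def classify_resolution(width: int | None) -> str:
--     """Classify the resolution tier by width."""
--
--     if not width:
--         return "Unknown"
--
--     for tier, min_width in sorted(
--         RESOLUTION_TIERS.items(),
--         key=lambda item: item[1],
--         reverse=True,
--     ):
--         if width >= min_width:
--             return tier
--
--     return "SD"
-- ===== SOURCE B (Python) =====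
-- def classify_resolution(width):
--     """Classify the resolution tier by width."""
--     if not width:
--         return "Unknown"
--     # rank = number of ascending thresholds the width reaches; index a label table
--     labels = ["SD", "720p", "1080p", "4K"]
--     idx = sum(width >= t for t in (1280, 1920, 3840))
--     return labels[idx]
-- ===== Notes on version B (the rewrite author's own statement) =====
-- stated objective: alternative
-- what changed: Instead of A's dict construction, reverse value-sort and first-match scan, B computes the tier's index directly by counting how many ascending thresholds the width reaches and indexes a label table with that rank.
import Mathlib
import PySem

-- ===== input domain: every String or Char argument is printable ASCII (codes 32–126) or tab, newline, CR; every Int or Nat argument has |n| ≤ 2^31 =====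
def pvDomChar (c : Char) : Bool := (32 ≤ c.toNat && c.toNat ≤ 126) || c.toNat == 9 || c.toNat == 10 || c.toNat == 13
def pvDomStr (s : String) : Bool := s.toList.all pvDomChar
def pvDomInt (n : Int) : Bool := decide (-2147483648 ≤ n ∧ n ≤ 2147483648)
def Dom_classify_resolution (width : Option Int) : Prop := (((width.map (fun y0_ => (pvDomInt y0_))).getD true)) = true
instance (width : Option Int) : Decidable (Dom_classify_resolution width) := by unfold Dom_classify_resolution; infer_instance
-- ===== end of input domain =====

-- B replaces A's dict + reverse sort + first-match scan with a rank count over ascending thresholds indexing a label table (alternative decomposition, same cost).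


-- ===== PORT A =====
-- module constant RESOLUTION_TIERS (dict in insertion order)
def RESOLUTION_TIERS : PySem.Dict String Int :=
  PySem.Dict.ofList [("SD", 0), ("720p", 1280), ("1080p", 1920), ("4K", 3840)]

-- A's for-loop over the sorted items: first tier whose min_width is ≤ width, else fallback "SD"
def classifyLoopA (w : Int) : List (String × Int) → String
  | [] => "SD"
  | (tier, min_width) :: rest => if w ≥ min_width then tier else classifyLoopA w rest

def classify_resolution (width : Option Int) : String :=
  match width with
  | none => "Unknown"            -- `not width` true for None
  | some w =>
    if w = 0 then "Unknown"      -- `not width` true for 0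
    else classifyLoopA w (PySem.List.sorted RESOLUTION_TIERS.items (fun item => item.2) true)

-- ===== PORT B =====
def classify_resolution_alt (width : Option Int) : String :=
  match width with
  | none => "Unknown"
  | some w =>
    if w = 0 then "Unknown"
    else
      let labels : List String := ["SD", "720p", "1080p", "4K"]
      let idx : Int := ([1280, 1920, 3840] : List Int).foldl
        (fun acc t => acc + (if w ≥ t then 1 else 0)) 0
      -- labels[idx]: idx is always 0..3, so the pyGet? never fails; default never taken
      (PySem.List.pyGet? labels idx).getD ""

-- ===== PRECONDITION & SPEC =====
def Spec_classify_resolution (width : Option Int) (out : String) : Prop := out = classify_resolution_alt width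
instance (width : Option Int) (out : String) : Decidable (Spec_classify_resolution width out) := by unfold Spec_classify_resolution; infer_instance

-- ===== CLAIM (what is proved, stated in full; the proofs are below) =====
def Claim_equal_classify_resolution : Prop := ∀ (width : Option Int), Dom_classify_resolution width → Spec_classify_resolution width (classify_resolution width)

-- ===== LEMMAS AND PROOFS =====
-- the reverse sort of the constant 4-entry table, evaluated once
theorem sorted_tiers :
    PySem.List.sorted RESOLUTION_TIERS.items (fun item : String × Int => item.2) true
      = [("4K", 3840), ("1080p", 1920), ("720p", 1280), ("SD", 0)] := by
  decide

-- ===== VERDICT (by name: the statement is the Claim_ definition above) =====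
theorem classify_resolution_spec : Claim_equal_classify_resolution := by
  intro width _
  unfold Spec_classify_resolution classify_resolution classify_resolution_alt
  cases width with
  | none => rfl
  | some w =>
    rw [sorted_tiers]
    simp only [classifyLoopA, List.foldl]
    split_ifs with h0 h1 h2 h3 <;>
      simp [PySem.List.pyGet?, PySem.List.pyIdx?] <;> omega
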